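-- pv_equiv track=rewrite | github.com/kas/firecode.io | problems/1.6.py | duplicate_items
-- ===== SOURCE A (Python) =====
-- def duplicate_items(list_numbers):
--     dictionary = {}
--     duplicates = []
--
--     for number in list_numbers:
--         if str(number) in dictionary:
--             dictionary[str(number)] += 1
--         else:
--             dictionary[str(number)] = 1
--
--     for number, count in dictionary.items():
--         if count > 1:
--             duplicates.append(number)
--
--     duplicates.sort()
--
--     return duplicates
-- ===== SOURCE B (Python) =====
-- def duplicate_items(list_numbers):
--     seen = set()
--     duplicates = set()
--     for number in list_numbers:
--         s = str(number)
--         if s in seen: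
--             duplicates.add(s)
--         else:
--             seen.add(s)
--     return sorted(duplicates)
-- ===== Notes on version B (the rewrite author's own statement) =====
-- stated objective: idiomatic
-- what changed: Replaces the count-dictionary plus a second scan over its items with a single pass maintaining two sets (seen/duplicates) that detects repeats inline.
import Mathlib
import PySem

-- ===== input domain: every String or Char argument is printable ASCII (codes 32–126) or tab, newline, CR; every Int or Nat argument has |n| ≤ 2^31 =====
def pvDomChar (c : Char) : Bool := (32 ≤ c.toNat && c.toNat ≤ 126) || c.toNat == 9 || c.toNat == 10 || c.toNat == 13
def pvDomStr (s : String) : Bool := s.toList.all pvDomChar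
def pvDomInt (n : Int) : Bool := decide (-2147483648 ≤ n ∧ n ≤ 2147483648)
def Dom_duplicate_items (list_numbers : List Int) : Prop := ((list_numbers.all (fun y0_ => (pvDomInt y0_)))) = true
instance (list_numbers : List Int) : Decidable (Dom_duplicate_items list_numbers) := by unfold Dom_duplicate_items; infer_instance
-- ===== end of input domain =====

-- B replaces A's count-dictionary plus second scan over its items with a single pass over two sets (seen/duplicates); same task, idiomatic form, same cost.

-- ===== PORT A =====
def duplicate_items (list_numbers : List Int) : List String :=
  let dictionary := list_numbers.foldl (fun (d : PySem.Dict String Int) number =>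
      if d.contains (PySem.Int.toStr number)
      then d.modify (PySem.Int.toStr number) 0 (· + 1)
      else d.insert (PySem.Int.toStr number) 1) PySem.Dict.empty
  let duplicates := dictionary.items.foldl (fun (acc : List String) p =>
      if p.2 > 1 then acc ++ [p.1] else acc) []
  PySem.List.sorted duplicates (fun x => x) false

-- ===== PORT B =====
def duplicate_items_alt (list_numbers : List Int) : List String :=
  let st := list_numbers.foldl (fun (st : PySem.Set String × PySem.Set String) number =>
      let s := PySem.Int.toStr number
      if PySem.Set.contains st.1 s then (st.1, PySem.Set.add st.2 s)
      else (PySem.Set.add st.1 s, st.2))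
    ((PySem.Set.empty : PySem.Set String), (PySem.Set.empty : PySem.Set String))
  PySem.List.sorted st.2 (fun x => x) false

-- ===== PRECONDITION & SPEC =====
def Spec_duplicate_items (list_numbers : List Int) (out : List String) : Prop := out = duplicate_items_alt list_numbers
instance (list_numbers : List Int) (out : List String) : Decidable (Spec_duplicate_items list_numbers out) := by unfold Spec_duplicate_items; infer_instance

-- ===== CLAIM (what is proved, stated in full; the proofs are below) =====
def Claim_equal_duplicate_items : Prop := ∀ (list_numbers : List Int), Dom_duplicate_items list_numbers → Spec_duplicate_items list_numbers (duplicate_items list_numbers)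

-- ===== LEMMAS AND PROOFS =====

-- A's counting loop equals Counter over the mapped strings.
theorem dictA_eq_counter (xs : List Int) :
    xs.foldl (fun (d : PySem.Dict String Int) number =>
      if d.contains (PySem.Int.toStr number)
      then d.modify (PySem.Int.toStr number) 0 (· + 1)
      else d.insert (PySem.Int.toStr number) 1) PySem.Dict.empty
    = PySem.Dict.counter (xs.map PySem.Int.toStr) := by
  rw [PySem.Dict.counter_eq_foldl, List.foldl_map]
  apply PySem.List.foldl_congr_mem
  intro d n _
  by_cases h : d.contains (PySem.Int.toStr n)
  · simp [h, PySem.Dict.modify]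
  · simp only [h, Bool.false_eq_true, if_false, PySem.Dict.modify]
    congr 1
    have hc := PySem.Dict.contains_eq_isSome_get? (d := d) (k := PySem.Int.toStr n)
    rw [hc] at h
    cases hg : d.get? (PySem.Int.toStr n) <;> simp_all [PySem.Dict.getD]

-- A's pre-sort duplicates list: the distinct strings with count > 1, in first-occurrence order.
theorem dupsA_char (xs : List Int) :
    (PySem.Dict.counter (xs.map PySem.Int.toStr)).items.foldl
      (fun (acc : List String) p => if p.2 > 1 then acc ++ [p.1] else acc) []
    = (PySem.Set.ofList (xs.map PySem.Int.toStr)).filter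
        (fun k => decide ((((xs.map PySem.Int.toStr).count k : Int)) > 1)) := by
  rw [PySem.Dict.items_counter]
  rw [PySem.List.foldl_append_ite (p := fun (p : String × Int) => p.2 > 1) (f := fun p => p.1)]
  simp [List.filter_map, List.map_map, Function.comp_def]

theorem set_add_nodup (d : List String) (s : String) (h : d.Nodup) : (PySem.Set.add d s).Nodup := by
  by_cases hc : s ∈ d <;>
    simp [PySem.Set.add, PySem.Set.contains, hc, h, List.nodup_append]
  exact fun a ha he => hc (he ▸ ha)

theorem bloop_inv (xs : List Int) : ∀ (ys : List String) (dups : List String),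
    (∀ s, s ∈ dups ↔ 2 ≤ ys.count s) → dups.Nodup →
    (∀ s, s ∈ (xs.foldl (fun (st : PySem.Set String × PySem.Set String) number =>
        let s := PySem.Int.toStr number
        if PySem.Set.contains st.1 s then (st.1, PySem.Set.add st.2 s)
        else (PySem.Set.add st.1 s, st.2)) (PySem.Set.ofList ys, dups)).2 ↔
          2 ≤ (ys ++ xs.map PySem.Int.toStr).count s) ∧
    (xs.foldl (fun (st : PySem.Set String × PySem.Set String) number =>
        let s := PySem.Int.toStr number
        if PySem.Set.contains st.1 s then (st.1, PySem.Set.add st.2 s)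
        else (PySem.Set.add st.1 s, st.2)) (PySem.Set.ofList ys, dups)).2.Nodup := by
  induction xs with
  | nil => intro ys dups hmem hnd; simpa using ⟨hmem, hnd⟩
  | cons n xs ih =>
    intro ys dups hmem hnd
    simp only [List.foldl_cons]
    set s := PySem.Int.toStr n with hs
    have hlist : (ys ++ [s]) ++ List.map PySem.Int.toStr xs
        = ys ++ List.map PySem.Int.toStr (n :: xs) := by
      rw [List.append_assoc, List.map_cons, List.singleton_append, hs]
    by_cases hc : s ∈ ys
    · have hc' : PySem.Set.contains (PySem.Set.ofList ys) s = true := by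
        simp [PySem.Set.contains, PySem.Set.mem_ofList, hc]
      simp only [hc', if_pos]
      have hof : PySem.Set.ofList (ys ++ [s]) = PySem.Set.ofList ys := by
        have h2 : PySem.Set.ofList (ys ++ [s]) = PySem.Set.add (PySem.Set.ofList ys) s := by
          simp [PySem.Set.ofList_eq_foldl, List.foldl_append]
        rw [h2]; simp [PySem.Set.add, PySem.Set.contains, PySem.Set.mem_ofList, hc]
      have h1 : ∀ t, t ∈ PySem.Set.add dups s ↔ 2 ≤ (ys ++ [s]).count t := by
        intro t
        rw [PySem.Set.mem_add, List.count_append]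
        by_cases ht : t = s
        · subst ht
          have hys : 1 ≤ List.count s ys := List.count_pos_iff.mpr hc
          have hone : List.count s [s] = 1 := by simp
          rw [hone]
          exact ⟨fun _ => by omega, fun _ => Or.inr rfl⟩
        · have hzero : List.count t [s] = 0 := by
            simp [List.count_eq_zero]; exact fun h => absurd h ht
          rw [hzero, hmem t]
          simp [ht]
      have hres := ih (ys ++ [s]) (PySem.Set.add dups s) h1 (set_add_nodup _ _ hnd)
      rw [hof, hlist] at hres
      exact hres
    · have hc' : ¬ PySem.Set.contains (PySem.Set.ofList ys) s = true := by
        simp [PySem.Set.contains, PySem.Set.mem_ofList, hc]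
      simp only [hc', Bool.false_eq_true, if_false]
      have hof : PySem.Set.ofList (ys ++ [s]) = PySem.Set.add (PySem.Set.ofList ys) s := by
        simp [PySem.Set.ofList_eq_foldl, List.foldl_append]
      have h1 : ∀ t, t ∈ dups ↔ 2 ≤ (ys ++ [s]).count t := by
        intro t
        rw [List.count_append]
        by_cases ht : t = s
        · subst ht
          have h0 : List.count s ys = 0 := List.count_eq_zero.mpr hc
          have hone : List.count s [s] = 1 := by simp
          rw [h0, hone, hmem s]
          omega
        · have hzero : List.count t [s] = 0 := by
            simp [List.count_eq_zero]; exact fun h => absurd h ht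
          rw [hzero, hmem t]
          simp
      have hres := ih (ys ++ [s]) dups h1 hnd
      rw [hof, hlist] at hres
      exact hres

-- ===== VERDICT (by name: the statement is the Claim_ definition above) =====
theorem duplicate_items_spec : Claim_equal_duplicate_items := by
  intro xs _
  unfold Spec_duplicate_items duplicate_items duplicate_items_alt
  simp only []
  rw [dictA_eq_counter, dupsA_char]
  have hb := bloop_inv xs [] [] (by simp) List.nodup_nil
  set ys := xs.map PySem.Int.toStr with hys
  set Apre := (PySem.Set.ofList ys).filter (fun k => decide (((ys.count k : Int)) > 1)) with hA
  have hAnd : Apre.Nodup := (PySem.Set.nodup_ofList ys).filter _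
  have hAm : ∀ t, t ∈ Apre ↔ 2 ≤ ys.count t := by
    intro t
    rw [hA, List.mem_filter, PySem.Set.mem_ofList]
    constructor
    · intro ⟨_, h2⟩
      have := of_decide_eq_true h2
      omega
    · intro h2
      refine ⟨List.count_pos_iff.mp (by omega), decide_eq_true (by exact_mod_cast by omega)⟩
  have hperm : Apre.Perm (xs.foldl (fun (st : PySem.Set String × PySem.Set String) number =>
        let s := PySem.Int.toStr number
        if PySem.Set.contains st.1 s then (st.1, PySem.Set.add st.2 s)
        else (PySem.Set.add st.1 s, st.2)) (PySem.Set.ofList [], [])).2 := by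
    refine (List.perm_ext_iff_of_nodup hAnd hb.2).mpr ?_
    intro t
    rw [hAm t, hb.1 t]
    simp
  exact PySem.List.sorted_eq_sorted_of_perm _ _ _ (fun a b h => h) hperm
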